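-- pv_equiv track=rewrite | github.com/rachd/expLoRApi | build/lib.linux-x86_64-2.7/explor/similarCards.py | get_3_copy_cards
-- ===== SOURCE A (Python) =====
-- def get_3_copy_cards(deck):
--     card_counts = {}
--     for card in deck:
--         if card in card_counts.keys():
--             card_counts[card] += 1
--         else:
--             card_counts[card] = 1
--     return [code for code in card_counts.keys() if card_counts[code] == 3]
-- ===== SOURCE B (Python) =====
-- def get_3_copy_cards(deck):
--     seen = set()
--     result = []
--     for card in deck:
--         if card not in seen:
--             seen.add(card)
--             if deck.count(card) == 3:
--                 result.append(card)
--     return result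
-- ===== Notes on version B (the rewrite author's own statement) =====
-- stated objective: alternative
-- what changed: Replaces the frequency dictionary with a single pass keeping a 'seen' list and calling deck.count on each first occurrence, appending cards whose count is 3 in first-appearance order.
import Mathlib
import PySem

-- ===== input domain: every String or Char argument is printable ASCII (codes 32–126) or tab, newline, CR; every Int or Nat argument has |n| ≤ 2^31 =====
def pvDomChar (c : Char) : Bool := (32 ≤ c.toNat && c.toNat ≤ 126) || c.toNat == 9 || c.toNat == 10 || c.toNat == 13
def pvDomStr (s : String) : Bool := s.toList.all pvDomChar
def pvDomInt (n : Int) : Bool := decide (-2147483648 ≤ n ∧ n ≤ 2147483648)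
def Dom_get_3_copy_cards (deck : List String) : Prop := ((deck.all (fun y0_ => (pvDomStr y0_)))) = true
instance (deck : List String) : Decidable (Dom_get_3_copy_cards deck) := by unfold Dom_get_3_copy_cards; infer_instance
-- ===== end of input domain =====

-- B replaces A's frequency dictionary with a single pass over the deck keeping a
-- 'seen' list and calling deck.count on each first occurrence (alternative decomposition, same results).


-- ===== PORT A =====
def get_3_copy_cards (deck : List String) : List String :=
  let card_counts : PySem.Dict String Int :=
    deck.foldl (fun d card =>
      if d.contains card then d.insert card (d.getD card 0 + 1)
      else d.insert card 1) PySem.Dict.empty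
  card_counts.keys.filter (fun code => card_counts.getD code 0 == 3)

-- ===== PORT B =====
def get_3_copy_cards_alt (deck : List String) : List String :=
  (deck.foldl (fun (st : List String × List String) card =>
      if st.1.contains card then st
      else (PySem.Set.add st.1 card,
            if PySem.List.count deck card == 3 then st.2 ++ [card] else st.2))
    ([], [])).2

-- ===== PRECONDITION & SPEC =====
def Spec_get_3_copy_cards (deck : List String) (out : List String) : Prop := out = get_3_copy_cards_alt deck
instance (deck : List String) (out : List String) : Decidable (Spec_get_3_copy_cards deck out) := by unfold Spec_get_3_copy_cards; infer_instance

-- ===== CLAIM (what is proved, stated in full; the proofs are below) =====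
def Claim_equal_get_3_copy_cards : Prop := ∀ (deck : List String), Dom_get_3_copy_cards deck → Spec_get_3_copy_cards deck (get_3_copy_cards deck)

-- ===== LEMMAS AND PROOFS =====

-- A's per-card branch is the uniform 'insert card (getD card 0 + 1)' step.
lemma foldA_step_eq (d : PySem.Dict String Int) (card : String) :
    (if d.contains card then d.insert card (d.getD card 0 + 1) else d.insert card 1)
      = d.insert card (d.getD card 0 + 1) := by
  by_cases h : d.contains card = true
  · simp [h]
  · simp [h, PySem.Dict.getD_of_not_contains d 0 (by simpa using h)]

lemma foldA_eq_counter (deck : List String) :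
    deck.foldl (fun d card =>
      if d.contains card then d.insert card (d.getD card 0 + 1)
      else d.insert card 1) PySem.Dict.empty = PySem.Dict.counter deck := by
  rw [← PySem.Dict.foldl_insert_getD_add_one_eq_counter]
  exact PySem.List.foldl_congr_mem _ _ _ _ (fun d card _ => foldA_step_eq d card)

-- B's loop invariant: the result list is the filter of the seen-set.
lemma B_loop (pred : String → Bool) :
    ∀ (l seen res : List String), res = seen.filter pred →
    l.foldl (fun (st : List String × List String) card =>
        if st.1.contains card then st
        else (PySem.Set.add st.1 card, if pred card then st.2 ++ [card] else st.2)) (seen, res)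
      = (PySem.Set.update seen l, (PySem.Set.update seen l).filter pred) := by
  intro l
  induction l with
  | nil => intro seen res h; simp [PySem.Set.update, h]
  | cons x t ih =>
      intro seen res h
      by_cases hx : x ∈ seen
      · have : PySem.Set.update seen (x :: t) = PySem.Set.update (PySem.Set.add seen x) t := rfl
        simp only [List.foldl_cons, this, PySem.Set.add_of_mem hx]
        simpa [hx] using ih seen res h
      · have hupd : PySem.Set.update seen (x :: t) = PySem.Set.update (seen ++ [x]) t := by
          show PySem.Set.update (PySem.Set.add seen x) t = _
          rw [PySem.Set.add_of_not_mem hx]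
        simp only [List.foldl_cons, hupd]
        have hadd : PySem.Set.add seen x = seen ++ [x] := PySem.Set.add_of_not_mem hx
        have hres : (if pred x then res ++ [x] else res) = (seen ++ [x]).filter pred := by
          by_cases hp : pred x = true <;> simp [hp, h, List.filter_append]
        simpa [hx, hadd] using ih (seen ++ [x]) _ hres

-- ===== VERDICT (by name: the statement is the Claim_ definition above) =====
theorem get_3_copy_cards_spec : Claim_equal_get_3_copy_cards := by
  intro deck _
  show get_3_copy_cards deck = get_3_copy_cards_alt deck
  unfold get_3_copy_cards get_3_copy_cards_alt
  rw [foldA_eq_counter,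
      B_loop (fun card => PySem.List.count deck card == 3) deck [] [] rfl]
  simp only [PySem.Dict.keys_counter, PySem.Dict.getD_counter, PySem.List.count_eq,
    ← PySem.Set.ofList_eq_foldl, PySem.Set.update]
  exact List.filter_congr (fun c _ => by simp; omega)
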